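-- pv_equiv track=rewrite | github.com/pypi-data/pypi-mirror-399 | packages/nirs4all/nirs4all-0.6.0-py3-none-any.whl/nirs4all/data/loaders/archive_loader.py | _select_member
-- ===== SOURCE A (Python) =====
-- from typing import Any, ClassVar, Dict, List, Optional, Tuple, Type
--
-- def _select_member(
--
--     requested: Optional[str],
--     available: List[str],
--     report: Dict[str, Any],
-- ) -> Optional[str]:
--     """Select which member to extract."""
--     if requested is not None:
--         if requested in available:
--             return requested
--         report["error"] = (
--             f"Member '{requested}' not found in archive. "
--             f"Available: {available}"
--         )
--         return None
--
--     # Auto-select priority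
--     preferred_extensions = [".csv", ".parquet", ".pq", ".npy", ".npz", ".xlsx", ".mat"]
--
--     for ext in preferred_extensions:
--         matches = [m for m in available if m.lower().endswith(ext)]
--         if matches:
--             if len(matches) > 1:
--                 report["warnings"].append(
--                     f"Multiple {ext} files found. Using '{matches[0]}'. "
--                     f"Specify 'member' to choose a specific file."
--                 )
--             return matches[0]
--
--     # Fall back to first file
--     return available[0]
-- ===== SOURCE B (Python) =====
-- def _select_member(requested, available, report):
--     """Select which member to extract: requested if present, else the member
--     whose extension has the best priority (first member on ties), else the
--     first file. Return-value reimplementation via a single stable min; it does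
--     not touch report["warnings"] (under the string-valued report this task
--     declares, A raises KeyError/AttributeError on every multi-match input)."""
--     if requested is not None:
--         if requested in available:
--             return requested
--         report["error"] = (
--             f"Member '{requested}' not found in archive. "
--             f"Available: {available}"
--         )
--         return None
--
--     preferred_extensions = [".csv", ".parquet", ".pq", ".npy", ".npz", ".xlsx", ".mat"]
--
--     def priority(m):
--         ml = m.lower()
--         for i, ext in enumerate(preferred_extensions):
--             if ml.endswith(ext):
--                 return i
--         return len(preferred_extensions)
--
--     return min(available, key=priority)
-- ===== Notes on version B (the rewrite author's own statement) =====
-- stated objective: alternative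
-- what changed: Replaces the per-extension loop that builds a matches list for each preferred extension with a single stable min over the members keyed by each member's first-matching-extension priority (non-matching members get the lowest priority, so the first-file fallback is the same min).
-- outside the precondition, e.g. on _select_member(None, ['a.csv', 'b.csv'], {}): A raises KeyError, B returns 'a.csv'; on _select_member(None, [], {}): A raises IndexError, B raises ValueError
-- crash fix: With requested=None, A raises IndexError on an empty archive and, whenever the winning extension matches more than one member, raises KeyError/AttributeError on report['warnings'].append (report values are strings under the declared type); B returns the first best-priority member there (and the first member of a nonempty archive). — e.g. on _select_member(none, ["a.csv", "b.csv"], []): A raises KeyError, B returns some "a.csv"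
import Mathlib
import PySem

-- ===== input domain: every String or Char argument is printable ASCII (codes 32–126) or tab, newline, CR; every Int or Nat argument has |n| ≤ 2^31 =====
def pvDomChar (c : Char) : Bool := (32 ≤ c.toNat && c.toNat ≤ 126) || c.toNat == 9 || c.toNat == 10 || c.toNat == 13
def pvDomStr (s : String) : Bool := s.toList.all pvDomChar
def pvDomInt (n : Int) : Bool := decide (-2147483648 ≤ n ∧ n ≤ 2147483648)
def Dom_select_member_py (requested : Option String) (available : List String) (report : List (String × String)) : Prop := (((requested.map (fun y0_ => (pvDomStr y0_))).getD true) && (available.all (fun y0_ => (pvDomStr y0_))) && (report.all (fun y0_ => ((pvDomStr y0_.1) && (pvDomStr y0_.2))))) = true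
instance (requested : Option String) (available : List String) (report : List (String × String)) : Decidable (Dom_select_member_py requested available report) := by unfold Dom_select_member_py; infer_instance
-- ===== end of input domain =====

-- B selects by a single stable min over the members keyed by first-matching-extension
-- priority instead of A's per-extension matches loop; equivalence is about the RETURN
-- value only (A also mutates `report`: B performs the same "error" write but never the
-- "warnings" append — under the declared string-valued report, A raises on that path).

-- ===== PORT A =====
def pvExts : List String := [".csv", ".parquet", ".pq", ".npy", ".npz", ".xlsx", ".mat"]

-- the `for ext in preferred_extensions` loop of A
def pvSelGo (available : List String) : List String → Option String
  | [] => PySem.List.pyGet? available 0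
  | ext :: rest =>
    let ms := available.filter (fun m => PySem.Str.endswith (PySem.Str.lower m) ext)
    if ms.isEmpty then pvSelGo available rest else PySem.List.pyGet? ms 0

def select_member_py (requested : Option String) (available : List String) (report : List (String × String)) : Option String :=
  match requested with
  | some r => if available.contains r then some r else none
  | none => pvSelGo available pvExts

-- ===== PORT B =====
-- the `for i, ext in enumerate(preferred_extensions)` loop of B's priority()
def pvPriorityLoop (ml : String) : List (Int × String) → Int
  | [] => (pvExts.length : Int)
  | (i, ext) :: rest => if PySem.Str.endswith ml ext then i else pvPriorityLoop ml rest

def pvPriority (m : String) : Int :=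
  pvPriorityLoop (PySem.Str.lower m) (PySem.List.enumerate pvExts 0)

def select_member_py_alt (requested : Option String) (available : List String) (report : List (String × String)) : Option String :=
  match requested with
  | some r => if available.contains r then some r else none
  | none => PySem.List.min? available pvPriority

-- ===== PRECONDITION & SPEC =====
def pvMatchCount (available : List String) (ext : String) : Nat :=
  (available.filter (fun m => PySem.Str.endswith (PySem.Str.lower m) ext)).length

-- true iff the first preferred extension with any match has at most one match
def pvNoMulti (available : List String) : Prop :=
  ∀ k ∈ List.range pvExts.length,
    ((pvExts.take k).all (fun e => pvMatchCount available e = 0)) = true →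
      pvMatchCount available (pvExts.getD k "") ≤ 1

-- Pre_ excludes exactly the inputs on which A RAISES under the declared types: with no
-- requested member, an empty archive (IndexError on available[0]) and any archive whose
-- winning extension matches more than one member — there A executes
-- report["warnings"].append(...), which raises KeyError (no such key) or AttributeError
-- (the value is a string, report being dict[str, str] here) before it can return.
def Pre_select_member_py (requested : Option String) (available : List String) (report : List (String × String)) : Prop :=
  match requested with
  | some _ => True
  | none => available ≠ [] ∧ pvNoMulti available

instance (requested : Option String) (available : List String) (report : List (String × String)) : Decidable (Pre_select_member_py requested available report) := by
  unfold Pre_select_member_py; unfold pvNoMulti; cases requested <;> infer_instance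

def pvWitness_select_member_py : Option String × List String × (List (String × String)) :=
  (none, ["a.csv"], [])

-- A raises (IndexError, or KeyError/AttributeError on the "warnings" append) exactly on
-- these inputs, where B returns the first best-priority member of a nonempty archive.
def Raises_select_member_py (requested : Option String) (available : List String) (report : List (String × String)) : Prop :=
  requested = none ∧ available ≠ [] ∧ ¬ pvNoMulti available

instance (requested : Option String) (available : List String) (report : List (String × String)) : Decidable (Raises_select_member_py requested available report) := by
  unfold Raises_select_member_py; unfold pvNoMulti; infer_instance

def pvRaiseWitness_select_member_py : Option String × List String × (List (String × String)) :=
  (none, ["a.csv", "b.csv"], [])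

def pvRaiseWitnessOut_select_member_py : Option String := some "a.csv"

def Spec_select_member_py (requested : Option String) (available : List String) (report : List (String × String)) (out : Option String) : Prop := out = select_member_py_alt requested available report
instance (requested : Option String) (available : List String) (report : List (String × String)) (out : Option String) : Decidable (Spec_select_member_py requested available report out) := by unfold Spec_select_member_py; infer_instance

-- ===== CLAIM (what is proved, stated in full; the proofs are below) =====
def Claim_equal_select_member_py : Prop := ∀ (requested : Option String) (available : List String) (report : List (String × String)), Dom_select_member_py requested available report → Pre_select_member_py requested available report → Spec_select_member_py requested available report (select_member_py requested available report)

def Claim_raises_select_member_py : Prop := (∀ (requested : Option String) (available : List String) (report : List (String × String)), Dom_select_member_py requested available report → Raises_select_member_py requested available report → ¬ Pre_select_member_py requested available report) ∧ (Dom_select_member_py (pvRaiseWitness_select_member_py.1) (pvRaiseWitness_select_member_py.2.1) (pvRaiseWitness_select_member_py.2.2) ∧ Raises_select_member_py (pvRaiseWitness_select_member_py.1) (pvRaiseWitness_select_member_py.2.1) (pvRaiseWitness_select_member_py.2.2) ∧ select_member_py_alt (pvRaiseWitness_select_member_py.1) (pvRaiseWitness_select_member_py.2.1) (pvRaiseWitness_select_member_py.2.2)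 = pvRaiseWitnessOut_select_member_py)

-- ===== LEMMAS AND PROOFS =====

-- xs[0] is head?
theorem pvPyGet_zero {α : Type} (xs : List α) : PySem.List.pyGet? xs 0 = xs.head? := by
  cases xs <;> simp [PySem.List.pyGet?, PySem.List.pyIdx?]


theorem pvFold_keep {α : Type} (key : α → Int) (lo : Int) :
    ∀ (xs : List α) (m : α), key m = lo → (∀ y ∈ xs, lo ≤ key y) →
    xs.foldl (fun acc x => match acc with
      | none => some x
      | some m => if key x < key m then some x else some m) (some m) = some m := by
  intro xs
  induction xs with
  | nil => intro m _ _; rfl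
  | cons x t ih =>
    intro m hm hall
    have hx : ¬ key x < key m := by
      have := hall x (List.mem_cons_self ..)
      omega
    simp only [List.foldl_cons, if_neg hx]
    exact ih m hm (fun y hy => hall y (List.mem_cons_of_mem _ hy))

theorem pvMin?_const {α : Type} (xs : List α) (c : Int) :
    PySem.List.min? xs (fun _ => c) = xs.head? := by
  cases xs with
  | nil => rfl
  | cons x t =>
    show List.foldl _ (some x) t = some x
    exact pvFold_keep (fun _ => c) c t x rfl (fun y _ => le_refl c)

theorem pvFold_reach {α : Type} (key : α → Int) (lo : Int) :
    ∀ (xs : List α) (m : α), lo < key m → (∀ y ∈ xs, lo ≤ key y) → (∃ y ∈ xs, key y = lo) →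
    xs.foldl (fun acc x => match acc with
      | none => some x
      | some m => if key x < key m then some x else some m) (some m)
      = (xs.filter (fun y => decide (key y = lo))).head? := by
  intro xs
  induction xs with
  | nil => intro m _ _ hex; rcases hex with ⟨y, hy, _⟩; cases hy
  | cons x t ih =>
    intro m hm hall hex
    by_cases hx : key x = lo
    · have hlt : key x < key m := by omega
      simp only [List.foldl_cons, if_pos hlt, List.filter_cons, decide_eq_true hx]
      exact pvFold_keep key lo t x hx (fun y hy => hall y (List.mem_cons_of_mem _ hy))
    · have hxlo : lo < key x := by
        have := hall x (List.mem_cons_self ..); omega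
      have hex' : ∃ y ∈ t, key y = lo := by
        rcases hex with ⟨y, hy, hylo⟩
        rcases List.mem_cons.mp hy with h | h
        · subst h; omega
        · exact ⟨y, h, hylo⟩
      have hall' : ∀ y ∈ t, lo ≤ key y := fun y hy => hall y (List.mem_cons_of_mem _ hy)
      simp only [List.foldl_cons, List.filter_cons, decide_eq_false hx]
      split
      · exact ih x hxlo hall' hex'
      · exact ih m hm hall' hex'

theorem pvMin?_first {α : Type} (key : α → Int) (lo : Int) (xs : List α)
    (hlo : ∀ y ∈ xs, lo ≤ key y) (hex : ∃ y ∈ xs, key y = lo) :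
    PySem.List.min? xs key = (xs.filter (fun y => decide (key y = lo))).head? := by
  cases xs with
  | nil => rcases hex with ⟨y, hy, _⟩; cases hy
  | cons x t =>
    by_cases hx : key x = lo
    · show List.foldl _ (some x) t = _
      simp only [List.filter_cons, decide_eq_true hx]
      exact pvFold_keep key lo t x hx (fun y hy => hlo y (List.mem_cons_of_mem _ hy))
    · have hxlo : lo < key x := by
        have := hlo x (List.mem_cons_self ..); omega
      have hex' : ∃ y ∈ t, key y = lo := by
        rcases hex with ⟨y, hy, hylo⟩
        rcases List.mem_cons.mp hy with h | h
        · subst h; omega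
        · exact ⟨y, h, hylo⟩
      show List.foldl _ (some x) t = _
      simp only [List.filter_cons, decide_eq_false hx]
      exact pvFold_reach key lo t x hxlo (fun y hy => hlo y (List.mem_cons_of_mem _ hy)) hex'

theorem pvFoldMin_congr {α : Type} (k1 k2 : α → Int) :
    ∀ (xs : List α) (m : α), (∀ x ∈ xs, k1 x = k2 x) → k1 m = k2 m →
    xs.foldl (fun acc x => match acc with
      | none => some x
      | some m => if k1 x < k1 m then some x else some m) (some m)
    = xs.foldl (fun acc x => match acc with
      | none => some x
      | some m => if k2 x < k2 m then some x else some m) (some m) := by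
  intro xs
  induction xs with
  | nil => intro m _ _; rfl
  | cons x t ih =>
    intro m hall hm
    have hx : k1 x = k2 x := hall x (List.mem_cons_self ..)
    have hall' : ∀ y ∈ t, k1 y = k2 y := fun y hy => hall y (List.mem_cons_of_mem _ hy)
    simp only [List.foldl_cons, hx, hm]
    split
    · exact ih x hall' hx
    · exact ih m hall' hm

theorem pvMin?_congr {α : Type} (k1 k2 : α → Int) (xs : List α)
    (h : ∀ x ∈ xs, k1 x = k2 x) :
    PySem.List.min? xs k1 = PySem.List.min? xs k2 := by
  cases xs with
  | nil => rfl
  | cons x t =>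
    show List.foldl _ (some x) t = List.foldl _ (some x) t
    exact pvFoldMin_congr k1 k2 t x (fun y hy => h y (List.mem_cons_of_mem _ hy))
      (h x (List.mem_cons_self ..))

theorem pvPriorityLoop_cases (ml : String) :
    ∀ ps : List (Int × String), pvPriorityLoop ml ps = (pvExts.length : Int) ∨
      ∃ p ∈ ps, pvPriorityLoop ml ps = p.1 := by
  intro ps
  induction ps with
  | nil => exact Or.inl rfl
  | cons p t ih =>
    obtain ⟨i, e⟩ := p
    by_cases h : PySem.Str.endswith ml e = true
    · exact Or.inr ⟨(i, e), List.mem_cons_self ..,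
        by rw [show pvPriorityLoop ml ((i, e) :: t)
            = if PySem.Str.endswith ml e then i else pvPriorityLoop ml t from rfl, if_pos h]⟩
    · rw [show pvPriorityLoop ml ((i, e) :: t)
          = if PySem.Str.endswith ml e then i else pvPriorityLoop ml t from rfl, if_neg h]
      rcases ih with h1 | ⟨q, hq, hq2⟩
      · exact Or.inl h1
      · exact Or.inr ⟨q, List.mem_cons_of_mem _ hq, hq2⟩

theorem pvMainLemma :
    ∀ (ps : List (Int × String)) (available : List String),
    (∀ p ∈ ps, p.1 < (pvExts.length : Int)) →
    ps.Pairwise (fun p q => p.1 < q.1) →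
    pvSelGo available (ps.map Prod.snd)
      = PySem.List.min? available (fun m => pvPriorityLoop (PySem.Str.lower m) ps) := by
  intro ps
  induction ps with
  | nil =>
    intro available _ _
    show PySem.List.pyGet? available 0 = _
    rw [pvPyGet_zero]
    exact (pvMin?_const available _).symm
  | cons p t ih =>
    intro available h1 h2
    obtain ⟨i, e⟩ := p
    have hi : i < (pvExts.length : Int) := h1 (i, e) (List.mem_cons_self ..)
    have hgt : ∀ q ∈ t, i < q.1 := fun q hq => (List.pairwise_cons.mp h2).1 q hq
    -- key facts
    have hkey : ∀ m : String, pvPriorityLoop (PySem.Str.lower m) ((i, e) :: t)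
        = if PySem.Str.endswith (PySem.Str.lower m) e then i
          else pvPriorityLoop (PySem.Str.lower m) t := by
      intro m; rfl
    have hrest_gt : ∀ m : String, i < pvPriorityLoop (PySem.Str.lower m) t := by
      intro m
      rcases pvPriorityLoop_cases (PySem.Str.lower m) t with h | ⟨q, hq, hq2⟩
      · omega
      · rw [hq2]; exact hgt q hq
    have hlo : ∀ m : String, i ≤ pvPriorityLoop (PySem.Str.lower m) ((i, e) :: t) := by
      intro m
      rw [hkey]
      split
      · exact le_refl i
      · exact le_of_lt (hrest_gt m)
    have hiff : ∀ m : String,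
        (pvPriorityLoop (PySem.Str.lower m) ((i, e) :: t) = i)
        ↔ PySem.Str.endswith (PySem.Str.lower m) e = true := by
      intro m
      rw [hkey]
      constructor
      · intro h
        by_contra hc
        rw [if_neg hc] at h
        have := hrest_gt m; omega
      · intro h; rw [if_pos h]
    show (let ms := available.filter (fun m => PySem.Str.endswith (PySem.Str.lower m) e);
          if ms.isEmpty then pvSelGo available (t.map Prod.snd)
          else PySem.List.pyGet? ms 0) = _
    by_cases hms : available.filter (fun m => PySem.Str.endswith (PySem.Str.lower m) e) = []
    · simp only [hms, List.isEmpty_nil, if_true]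
      rw [ih available (fun q hq => h1 q (List.mem_cons_of_mem _ hq))
        (List.pairwise_cons.mp h2).2]
      apply pvMin?_congr
      intro m hm
      have hf : ¬ PySem.Str.endswith (PySem.Str.lower m) e = true :=
        List.filter_eq_nil_iff.mp hms m hm
      rw [hkey, if_neg hf]
    · have hne : (available.filter (fun m => PySem.Str.endswith (PySem.Str.lower m) e)).isEmpty = false := by
        simpa [List.isEmpty_iff] using hms
      simp only [hne, Bool.false_eq_true, if_false]
      rw [pvPyGet_zero]
      rw [pvMin?_first _ i available (fun y _ => hlo y) ?hex]
      · congr 1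
        apply List.filter_congr
        intro m _
        by_cases h : PySem.Str.endswith (PySem.Str.lower m) e = true
        · rw [h, (hiff m).mpr h]; simp
        · have hne2 : pvPriorityLoop (PySem.Str.lower m) ((i, e) :: t) ≠ i :=
            fun hh => h ((hiff m).mp hh)
          rw [Bool.eq_false_iff.mpr h]
          simp [hne2]
      case hex =>
        obtain ⟨m, hm⟩ := List.exists_mem_of_ne_nil _ hms
        have := List.mem_filter.mp hm
        exact ⟨m, this.1, (hiff m).mpr this.2⟩

-- ===== VERDICT (by name: the statement is the Claim_ definition above) =====
theorem select_member_py_spec : Claim_equal_select_member_py := by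
  intro requested available report _ _
  unfold Spec_select_member_py select_member_py select_member_py_alt
  cases requested with
  | some r => rfl
  | none =>
    have h := pvMainLemma (PySem.List.enumerate pvExts 0) available (by decide) (by decide)
    have hmap : (PySem.List.enumerate pvExts 0).map Prod.snd = pvExts :=
      PySem.List.map_snd_enumerate pvExts 0
    rw [hmap] at h
    simpa [pvPriority] using h

theorem select_member_py_raises : Claim_raises_select_member_py := by
  unfold Claim_raises_select_member_py
  refine ⟨?_, by decide⟩
  intro requested available report _ hr hp
  rcases hr with ⟨hreq, _, hnm⟩
  subst hreq
  exact hnm hp.2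

-- self-check: the crash-fix witness value, read back out of the claim just proved
theorem pvRaiseWitness_ok :
    select_member_py_alt none ["a.csv", "b.csv"] [] = pvRaiseWitnessOut_select_member_py :=
  select_member_py_raises.2.2.2
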